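-- pv_equiv track=rewrite | github.com/BattMoTeam/BattMoApp | web/streamlit-gui/app_scripts/match_json_LD.py | move_dict_by_label
-- ===== SOURCE A (Python) =====
-- def move_dict_by_label(data_list, labels):
--     # Create a new list to store the removed dictionaries
--     removed_dicts = []
--
--     for label in labels:
--         # Iterate over the original list in reverse to avoid issues while modifying the list
--         for item in data_list[:]:  # Using a copy of the list for safe iteration
--             if item.get("rdfs:label") == label:
--                 removed_dicts.append(item)
--                 data_list.remove(item)
--
--     return removed_dicts, data_list
-- ===== SOURCE B (Python) =====
-- def move_dict_by_label(data_list, labels):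
--     # One pass over data_list: partition into kept items and a label-indexed bucket
--     # of removed items; then emit buckets in (first-occurrence) label order.
--     # Mutates data_list in place, like the original.
--     label_set = set(labels)
--     buckets = {}
--     remaining = []
--     for item in data_list:
--         lbl = item.get("rdfs:label")
--         if lbl in label_set:
--             buckets.setdefault(lbl, []).append(item)
--         else:
--             remaining.append(item)
--     removed_dicts = []
--     seen = set()
--     for label in labels:
--         if label not in seen:
--             seen.add(label)
--             removed_dicts.extend(buckets.get(label, []))
--     data_list[:] = remaining
--     return removed_dicts, data_list
-- ===== Notes on version B (the rewrite author's own statement) =====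
-- stated objective: faster
-- what changed: A rescans and mutates the whole list once per label (remove() itself rescanning); B makes one pass over the data that partitions items into kept ones and per-label buckets, then one pass over the labels (with a seen-set for repeats) to emit the buckets in label order.
import Mathlib
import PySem

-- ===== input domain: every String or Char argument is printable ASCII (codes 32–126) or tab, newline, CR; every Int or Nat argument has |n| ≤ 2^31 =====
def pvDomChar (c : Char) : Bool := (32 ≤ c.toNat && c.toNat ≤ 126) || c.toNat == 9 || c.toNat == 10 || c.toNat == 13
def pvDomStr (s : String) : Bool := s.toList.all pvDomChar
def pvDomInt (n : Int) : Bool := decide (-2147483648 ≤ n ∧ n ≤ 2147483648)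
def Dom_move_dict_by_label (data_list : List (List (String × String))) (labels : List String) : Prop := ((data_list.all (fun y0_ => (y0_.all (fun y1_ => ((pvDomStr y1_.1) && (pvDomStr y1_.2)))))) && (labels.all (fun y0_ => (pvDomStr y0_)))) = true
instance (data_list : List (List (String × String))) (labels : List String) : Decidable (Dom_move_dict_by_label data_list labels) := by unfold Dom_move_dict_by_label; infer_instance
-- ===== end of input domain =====

-- B replaces A's per-label rescan-and-remove passes by ONE indexing pass over the data
-- plus one pass over the labels (objective: faster). Both A and B mutate data_list in
-- place (B via data_list[:] = remaining); the equivalence proved is about the return value.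

-- item.get("rdfs:label") on a Python dict built from the pairs (last write wins, as in dict(pairs))
def pvLab (item : List (String × String)) : Option String :=
  (PySem.Dict.ofList item).get? "rdfs:label"

-- ===== PORT A =====
-- 'data_list.remove(item)' never raises here (item is drawn from a copy of the list and
-- each occurrence is removed at most once), so remove?'s none branch is dead; getD st2.2
-- is only the total form of that transcription.
def move_dict_by_label (data_list : List (List (String × String))) (labels : List String) : (List (List (String × String))) × (List (List (String × String))) :=
  labels.foldl
    (fun st label =>
      st.2.foldl
        (fun st2 item =>
          if pvLab item == some label then
            (st2.1 ++ [item], (PySem.List.remove? st2.2 item).getD st2.2)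
          else st2)
        st)
    ([], data_list)

-- ===== PORT B =====
def move_dict_by_label_alt (data_list : List (List (String × String))) (labels : List String) : (List (List (String × String))) × (List (List (String × String))) :=
  let labelSet : PySem.Set String := PySem.Set.ofList labels
  -- one pass: bucket the matching items by label, keep the rest in order
  let part := data_list.foldl
    (fun (st : PySem.Dict String (List (List (String × String))) × List (List (String × String))) item =>
      match pvLab item with
      | some lbl =>
          if PySem.Set.contains labelSet lbl then
            (PySem.Dict.modify st.1 lbl [] (fun l => l ++ [item]), st.2)
          else (st.1, st.2 ++ [item])
      | none => (st.1, st.2 ++ [item]))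
    (PySem.Dict.empty, [])
  -- emit the buckets in label order, skipping labels already seen
  let rem := labels.foldl
    (fun (st : List (List (String × String)) × PySem.Set String) label =>
      if PySem.Set.contains st.2 label then st
      else (st.1 ++ PySem.Dict.getD part.1 label [], PySem.Set.add st.2 label))
    ([], PySem.Set.empty)
  (rem.1, part.2)

-- ===== PRECONDITION & SPEC =====
def Spec_move_dict_by_label (data_list : List (List (String × String))) (labels : List String) (out : (List (List (String × String))) × (List (List (String × String)))) : Prop := out = move_dict_by_label_alt data_list labels
instance (data_list : List (List (String × String))) (labels : List String) (out : (List (List (String × String))) × (List (List (String × String)))) : Decidable (Spec_move_dict_by_label data_list labels out) := by unfold Spec_move_dict_by_label; infer_instance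

-- ===== CLAIM (what is proved, stated in full; the proofs are below) =====
def Claim_equal_move_dict_by_label : Prop := ∀ (data_list : List (List (String × String))) (labels : List String), Dom_move_dict_by_label data_list labels → Spec_move_dict_by_label data_list labels (move_dict_by_label data_list labels)

-- ===== LEMMAS AND PROOFS =====

-- "item matches label L" / "item's label occurs in ls"
def pvMatch (L : String) (x : List (String × String)) : Bool := pvLab x == some L
def pvIn (ls : List String) (x : List (String × String)) : Bool :=
  match pvLab x with
  | some l => ls.contains l
  | none => false

-- what A collects: per label in order, the still-present matching items
def removedA (ls : List String) (d : List (List (String × String))) : List (List (String × String)) :=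
  match ls with
  | [] => []
  | L :: ls' => d.filter (pvMatch L) ++ removedA ls' (d.filter (fun x => ! pvMatch L x))

lemma pvIn_nil (x : List (String × String)) : pvIn [] x = false := by
  cases h : pvLab x <;> simp [pvIn, h]

lemma filter_pvIn_nil (d : List (List (String × String))) :
    d.filter (fun x => ! pvIn [] x) = d :=
  List.filter_eq_self.mpr (fun x _ => by simp [pvIn_nil])

lemma pvIn_cons (L : String) (ls : List String) (x : List (String × String)) :
    pvIn (L :: ls) x = (pvMatch L x || pvIn ls x) := by
  cases h : pvLab x with
  | none => simp [pvIn, pvMatch, h]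
  | some l => by_cases e : l = L <;> simp [pvIn, pvMatch, h, e]

lemma pvIn_append (ls1 ls2 : List String) (x : List (String × String)) :
    pvIn (ls1 ++ ls2) x = (pvIn ls1 x || pvIn ls2 x) := by
  cases h : pvLab x <;> simp [pvIn, h]

lemma pvIn_singleton (L : String) (x : List (String × String)) :
    pvIn [L] x = pvMatch L x := by
  cases h : pvLab x with
  | none => simp [pvIn, pvMatch, h]
  | some l => by_cases e : l = L <;> simp [pvIn, pvMatch, h, e]

lemma pvLab_of_match {L : String} {x : List (String × String)}
    (hm : pvMatch L x = true) : pvLab x = some L := by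
  simpa [pvMatch] using hm

lemma pvIn_of_match {L : String} {x : List (String × String)} (ls : List String)
    (hm : pvMatch L x = true) : pvIn ls x = ls.contains L := by
  simp [pvIn, pvLab_of_match hm]

lemma remove?_append_left {α : Type} [BEq α] [LawfulBEq α] (x : α) (c : List α) :
    ∀ pre : List α, x ∉ pre → PySem.List.remove? (pre ++ x :: c) x = some (pre ++ c) := by
  intro pre
  induction pre with
  | nil => intro _; simp
  | cons p pre ih =>
      intro h
      have hne : p ≠ x := by intro e; exact h (e ▸ List.mem_cons_self)
      have := PySem.List.remove?_cons_of_ne (x := p) (v := x) (xs := pre ++ x :: c) hne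
      simp only [List.cons_append, this, ih (by intro hx; exact h (List.mem_cons_of_mem _ hx))]
      rfl

-- A's inner pass (one label) over a copy of the data
lemma passA (L : String) :
    ∀ (c pre r : List (List (String × String))), (∀ x ∈ pre, pvMatch L x = false) →
      c.foldl
        (fun st2 item =>
          if pvLab item == some L then
            (st2.1 ++ [item], (PySem.List.remove? st2.2 item).getD st2.2)
          else st2)
        (r, pre ++ c)
      = (r ++ c.filter (pvMatch L), pre ++ c.filter (fun x => ! pvMatch L x)) := by
  intro c
  induction c with
  | nil => intro pre r h; simp
  | cons x c ih =>
      intro pre r h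
      by_cases hx : (pvLab x == some L) = true
      · have hxpre : x ∉ pre := by
          intro hmem
          have hf := h x hmem
          unfold pvMatch at hf
          rw [hf] at hx
          exact absurd hx (by simp)
        have hrm := remove?_append_left x c pre hxpre
        simp only [List.foldl_cons, hx, if_true, hrm, Option.getD_some]
        rw [ih pre (r ++ [x]) h]
        simp [pvMatch, hx, List.append_assoc]
      · have hxf : (pvLab x == some L) = false := by
          revert hx; cases (pvLab x == some L) <;> simp
        have h' : ∀ y ∈ pre ++ [x], pvMatch L y = false := by
          intro y hy
          rcases List.mem_append.mp hy with hy | hy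
          · exact h y hy
          · rw [List.mem_singleton.mp hy]; simpa [pvMatch] using hxf
        have hrec := ih (pre ++ [x]) r h'
        simp only [List.append_assoc, List.singleton_append] at hrec
        simp only [List.foldl_cons, hxf, Bool.false_eq_true, if_false]
        rw [hrec]
        simp [pvMatch, hxf]

-- A's whole loop
lemma outerA (ls : List String) :
    ∀ (r d : List (List (String × String))),
      ls.foldl
        (fun st label =>
          st.2.foldl
            (fun st2 item =>
              if pvLab item == some label then
                (st2.1 ++ [item], (PySem.List.remove? st2.2 item).getD st2.2)
              else st2)
            st)
        (r, d)
      = (r ++ removedA ls d, d.filter (fun x => ! pvIn ls x)) := by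
  induction ls with
  | nil => intro r d; simp [removedA, filter_pvIn_nil]
  | cons L ls ih =>
      intro r d
      have hp := passA L d [] r (by simp)
      simp only [List.nil_append] at hp
      simp only [List.foldl_cons, hp]
      rw [ih]
      rw [List.filter_filter]
      have hpt : ∀ a, (!pvIn ls a && !pvMatch L a) = !pvIn (L :: ls) a := by
        intro a; simp [pvIn_cons, Bool.not_or, Bool.and_comm]
      simp only [hpt, removedA, List.append_assoc]

-- B's single pass splits into a bucket fold and a filter
lemma splitB (data_list : List (List (String × String))) (labels : List String) :
    data_list.foldl
      (fun (st : PySem.Dict String (List (List (String × String))) × List (List (String × String))) item =>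
        match pvLab item with
        | some lbl =>
            if PySem.Set.contains (PySem.Set.ofList labels) lbl then
              (PySem.Dict.modify st.1 lbl [] (fun l => l ++ [item]), st.2)
            else (st.1, st.2 ++ [item])
        | none => (st.1, st.2 ++ [item]))
      (PySem.Dict.empty, [])
    = (data_list.foldl
        (fun d item => if pvIn labels item then PySem.Dict.modify d ((pvLab item).getD "") [] (fun l => l ++ [item]) else d)
        PySem.Dict.empty,
       data_list.filter (fun x => ! pvIn labels x)) := by
  have hstep :
      (fun (st : PySem.Dict String (List (List (String × String))) × List (List (String × String))) item =>
        match pvLab item with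
        | some lbl =>
            if PySem.Set.contains (PySem.Set.ofList labels) lbl then
              (PySem.Dict.modify st.1 lbl [] (fun l => l ++ [item]), st.2)
            else (st.1, st.2 ++ [item])
        | none => (st.1, st.2 ++ [item]))
      = (fun st item =>
          ((fun d item => if pvIn labels item then PySem.Dict.modify d ((pvLab item).getD "") [] (fun l => l ++ [item]) else d) st.1 item,
           (fun rem item => if pvIn labels item then rem else rem ++ [item]) st.2 item)) := by
    funext st item
    cases h : pvLab item with
    | none => simp [pvIn, h]
    | some l =>
        by_cases hm : l ∈ labels <;> simp [pvIn, h, hm]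
  rw [hstep, PySem.List.foldl_prod_mk
    (f := fun d item => if pvIn labels item then PySem.Dict.modify d ((pvLab item).getD "") [] (fun l => l ++ [item]) else d)
    (g := fun rem item => if pvIn labels item then rem else rem ++ [item])]
  have hsw : (fun (rem : List (List (String × String))) item => if pvIn labels item then rem else rem ++ [item])
      = (fun rem item => if (! pvIn labels item) then rem ++ [item] else rem) := by
    funext rem item; cases pvIn labels item <;> simp
  rw [hsw, PySem.List.foldl_append_if_eq_filter]
  simp

-- B's bucket: for a label of the list, its bucket is the matching items
lemma bucketB (data_list : List (List (String × String))) (labels : List String)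
    (L : String) (hL : labels.contains L = true) :
    PySem.Dict.getD
      (data_list.foldl
        (fun d item => if pvIn labels item then PySem.Dict.modify d ((pvLab item).getD "") [] (fun l => l ++ [item]) else d)
        PySem.Dict.empty) L []
    = data_list.filter (pvMatch L) := by
  have key : data_list.foldl
      (fun d item => if pvIn labels item then PySem.Dict.modify d ((pvLab item).getD "") [] (fun l => l ++ [item]) else d)
      PySem.Dict.empty
      = ((data_list.filter (fun x => pvIn labels x)).map (fun item => ((pvLab item).getD "", item))).foldl
          (fun d p => PySem.Dict.modify d p.1 [] (fun l => l ++ [p.2])) PySem.Dict.empty := by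
    rw [List.foldl_map, PySem.List.foldl_if_eq_foldl_filter]
  rw [key, PySem.Dict.getD_foldl_modify_append]
  rw [List.filter_map, List.map_map]
  have hid : ((fun (p : String × List (String × String)) => p.2) ∘ (fun item => ((pvLab item).getD "", item)))
      = (fun item => item) := rfl
  rw [hid, List.map_id', List.filter_filter]
  have hpt : ∀ a, (((fun (p : String × List (String × String)) => p.1 == L) ∘ (fun item => ((pvLab item).getD "", item))) a
        && pvIn labels a) = pvMatch L a := by
    intro a
    cases h : pvLab a with
    | none => simp [pvIn, pvMatch, h, Function.comp]
    | some l =>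
        by_cases e : l = L
        · have hLmem : L ∈ labels := by simpa using hL
          simp [pvIn, pvMatch, h, e, hLmem, Function.comp]
        · simp [pvIn, pvMatch, h, e, Function.comp]
  simp only [hpt]
  rfl

-- B's label loop with a seen-set produces exactly A's removed list
lemma bridgeB (data_list : List (List (String × String))) (labels : List String)
    (bucket : String → List (List (String × String)))
    (hb : ∀ L, labels.contains L = true → bucket L = data_list.filter (pvMatch L)) :
    ∀ (ls : List String) (seen : PySem.Set String) (out : List (List (String × String))),
      (∀ L ∈ ls, labels.contains L = true) →
      (ls.foldl
        (fun (st : List (List (String × String)) × PySem.Set String) label =>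
          if PySem.Set.contains st.2 label then st
          else (st.1 ++ bucket label, PySem.Set.add st.2 label))
        (out, seen)).1
      = out ++ removedA ls (data_list.filter (fun x => ! pvIn seen x)) := by
  intro ls
  induction ls with
  | nil => intro seen out h; simp [removedA]
  | cons L ls ih =>
      intro seen out h
      by_cases hc : PySem.Set.contains seen L = true
      · have hc' : seen.contains L = true := hc
        have hmemP : L ∈ seen := by simpa using hc'
        have h1 : (data_list.filter (fun x => ! pvIn seen x)).filter (pvMatch L) = [] := by
          rw [List.filter_eq_nil_iff]
          intro a ha
          have hin := List.of_mem_filter ha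
          intro hm
          rw [pvIn_of_match seen hm] at hin
          have : L ∉ seen := by simpa using hin
          exact this hmemP
        have h2 : (data_list.filter (fun x => ! pvIn seen x)).filter (fun x => ! pvMatch L x)
            = data_list.filter (fun x => ! pvIn seen x) := by
          apply List.filter_eq_self.mpr
          intro a ha
          have hin := List.of_mem_filter ha
          by_cases hm : pvMatch L a = true
          · rw [pvIn_of_match seen hm] at hin
            have : L ∉ seen := by simpa using hin
            exact absurd hmemP this
          · simp [(by revert hm; cases pvMatch L a <;> simp : pvMatch L a = false)]
        simp only [List.foldl_cons, hc, if_true]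
        rw [ih seen out (fun M hM => h M (List.mem_cons_of_mem _ hM))]
        simp only [removedA, h1, h2, List.nil_append]
      · have hc' : ¬ seen.contains L = true := hc
        have hnm : L ∉ seen := by simpa using hc'
        have hadd : PySem.Set.add seen L = seen ++ [L] := by
          simp only [PySem.Set.add]
          rw [if_neg hc]
        have hLlab : labels.contains L = true := h L List.mem_cons_self
        simp only [List.foldl_cons, hc, if_false, Bool.false_eq_true]
        rw [hadd, hb L hLlab,
          ih (seen ++ [L]) (out ++ data_list.filter (pvMatch L)) (fun M hM => h M (List.mem_cons_of_mem _ hM))]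
        have hA : data_list.filter (pvMatch L)
            = (data_list.filter (fun x => ! pvIn seen x)).filter (pvMatch L) := by
          rw [List.filter_filter]
          apply List.filter_congr
          intro a _
          by_cases hm : pvMatch L a = true
          · rw [hm, pvIn_of_match seen hm]; simp [hnm]
          · simp [(by revert hm; cases pvMatch L a <;> simp : pvMatch L a = false)]
        have hB : data_list.filter (fun x => ! pvIn (seen ++ [L]) x)
            = (data_list.filter (fun x => ! pvIn seen x)).filter (fun x => ! pvMatch L x) := by
          rw [List.filter_filter]
          apply List.filter_congr
          intro a _
          simp [pvIn_append, pvIn_singleton, Bool.not_or, Bool.and_comm]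
        simp only [removedA]
        rw [← hA, ← hB]
        simp [List.append_assoc]

theorem move_dict_by_label_spec : Claim_equal_move_dict_by_label := by
  intro data_list labels _
  unfold Spec_move_dict_by_label
  show move_dict_by_label data_list labels = move_dict_by_label_alt data_list labels
  simp only [move_dict_by_label, move_dict_by_label_alt]
  rw [outerA]
  simp only [splitB data_list labels]
  rw [bridgeB data_list labels
        (fun label => PySem.Dict.getD
          (data_list.foldl
            (fun d item => if pvIn labels item then PySem.Dict.modify d ((pvLab item).getD "") [] (fun l => l ++ [item]) else d)
            PySem.Dict.empty) label [])
        (fun L hL => bucketB data_list labels L hL)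
        labels PySem.Set.empty [] (fun M hM => by simpa using hM)]
  rw [show (PySem.Set.empty : PySem.Set String) = ([] : List String) from rfl, filter_pvIn_nil]
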